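-- pv_equiv track=rewrite | github.com/adidoit/socratify | socratify-yolo/generate_final_summary.py | categorize_companies
-- ===== SOURCE A (Python) =====
-- def categorize_companies(companies):
--     """Categorize companies by region and sector"""
--     categories = {
--         'AI_ML': [],
--         'Fintech': [],
--         'European': [],
--         'Asian': [],
--         'African': [],
--         'Latin_American': [],
--         'Climate_Tech': [],
--         'Biotech': [],
--         'Space_Tech': [],
--         'B2B_SaaS': [],
--         'E_commerce': [],
--         'Gaming': [],
--         'Other': []
--     }
--
--     # AI/ML companies
--     ai_keywords = ['ai', 'anthropic', 'openai', 'hugging face', 'cohere', 'replicate', 'runway', 'midjourney', 'stability ai']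
--
--     # Fintech companies
--     fintech_keywords = ['pay', 'bank', 'finance', 'stripe', 'plaid', 'robinhood', 'chime', 'wise', 'revolut', 'klarna', 'affirm', 'square']
--
--     # European companies
--     european_keywords = ['revolut', 'monzo', 'n26', 'spotify', 'klarna', 'wise', 'bolt', 'deliveroo', 'northvolt']
--
--     # Asian companies
--     asian_keywords = ['grab', 'gojek', 'shopee', 'tokopedia', 'sea limited', 'goto', 'ovo', 'dana', 'traveloka', 'careem']
--
--     # And so on for other categories...
--
--     for company in companies:
--         company_lower = company.lower()
--         categorized = False
--
--         # Check AI/ML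
--         if any(keyword in company_lower for keyword in ai_keywords):
--             categories['AI_ML'].append(company)
--             categorized = True
--         elif any(keyword in company_lower for keyword in fintech_keywords):
--             categories['Fintech'].append(company)
--             categorized = True
--         elif any(keyword in company_lower for keyword in european_keywords):
--             categories['European'].append(company)
--             categorized = True
--         elif any(keyword in company_lower for keyword in asian_keywords):
--             categories['Asian'].append(company)
--             categorized = True
--
--         if not categorized:
--             categories['Other'].append(company)
--
--     return categories
-- ===== SOURCE B (Python) =====
-- def categorize_companies(companies):
--     """Categorize companies by region and sector"""
--     table = [
--         ('AI_ML', ['ai', 'anthropic', 'openai', 'hugging face', 'cohere', 'replicate', 'runway', 'midjourney', 'stability ai']),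
--         ('Fintech', ['pay', 'bank', 'finance', 'stripe', 'plaid', 'robinhood', 'chime', 'wise', 'revolut', 'klarna', 'affirm', 'square']),
--         ('European', ['revolut', 'monzo', 'n26', 'spotify', 'klarna', 'wise', 'bolt', 'deliveroo', 'northvolt']),
--         ('Asian', ['grab', 'gojek', 'shopee', 'tokopedia', 'sea limited', 'goto', 'ovo', 'dana', 'traveloka', 'careem']),
--     ]
--     categories = {name: [] for name in
--                   ['AI_ML', 'Fintech', 'European', 'Asian', 'African', 'Latin_American',
--                    'Climate_Tech', 'Biotech', 'Space_Tech', 'B2B_SaaS', 'E_commerce', 'Gaming', 'Other']}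
--     # Category-major staged passes: each stage takes the companies still unassigned,
--     # keeps the ones matching its keywords, and hands the rest to the next stage.
--     remaining = companies
--     for name, keywords in table:
--         hits = []
--         misses = []
--         for company in remaining:
--             company_lower = company.lower()
--             if any(k in company_lower for k in keywords):
--                 hits.append(company)
--             else:
--                 misses.append(company)
--         categories[name] = hits
--         remaining = misses
--     categories['Other'] = remaining
--     return categories
-- ===== Notes on version B (the rewrite author's own statement) =====
-- stated objective: alternative
-- what changed: Replaces A's company-major single pass with a per-company if/elif first-match chain by category-major staged passes: each of the four categories in priority order partitions the still-unassigned companies into hits (assigned to it) and misses (handed to the next stage), and the survivors become 'Other'.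
import Mathlib
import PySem

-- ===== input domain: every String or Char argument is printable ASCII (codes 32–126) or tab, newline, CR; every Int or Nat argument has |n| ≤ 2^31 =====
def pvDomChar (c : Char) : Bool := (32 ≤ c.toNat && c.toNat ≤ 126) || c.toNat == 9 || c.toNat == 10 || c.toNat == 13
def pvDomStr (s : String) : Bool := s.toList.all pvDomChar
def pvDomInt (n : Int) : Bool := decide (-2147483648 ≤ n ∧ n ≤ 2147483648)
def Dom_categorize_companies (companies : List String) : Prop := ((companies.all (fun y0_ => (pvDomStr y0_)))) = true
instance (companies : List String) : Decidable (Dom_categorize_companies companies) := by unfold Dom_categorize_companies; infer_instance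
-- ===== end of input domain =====

-- B replaces A's company-major pass (per-company if/elif first-match chain) by category-major
-- staged passes that repeatedly partition the still-unassigned companies; objective: alternative (same cost).


-- ===== PORT A =====
def aiKeywords : List String := ["ai", "anthropic", "openai", "hugging face", "cohere", "replicate", "runway", "midjourney", "stability ai"]
def fintechKeywords : List String := ["pay", "bank", "finance", "stripe", "plaid", "robinhood", "chime", "wise", "revolut", "klarna", "affirm", "square"]
def europeanKeywords : List String := ["revolut", "monzo", "n26", "spotify", "klarna", "wise", "bolt", "deliveroo", "northvolt"]
def asianKeywords : List String := ["grab", "gojek", "shopee", "tokopedia", "sea limited", "goto", "ovo", "dana", "traveloka", "careem"]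

def initCategories : PySem.Dict String (List String) :=
  PySem.Dict.ofList [("AI_ML", []), ("Fintech", []), ("European", []), ("Asian", []),
    ("African", []), ("Latin_American", []), ("Climate_Tech", []), ("Biotech", []),
    ("Space_Tech", []), ("B2B_SaaS", []), ("E_commerce", []), ("Gaming", []), ("Other", [])]

def categorize_companies (companies : List String) : List (String × List String) :=
  (companies.foldl (fun cats company =>
    let company_lower := PySem.Str.lower company
    -- the if/elif chain, carrying the `categorized` flag
    let st :=
      if aiKeywords.any (fun kw => PySem.Str.isIn kw company_lower) then
        (cats.modify "AI_ML" [] (fun l => l ++ [company]), true)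
      else if fintechKeywords.any (fun kw => PySem.Str.isIn kw company_lower) then
        (cats.modify "Fintech" [] (fun l => l ++ [company]), true)
      else if europeanKeywords.any (fun kw => PySem.Str.isIn kw company_lower) then
        (cats.modify "European" [] (fun l => l ++ [company]), true)
      else if asianKeywords.any (fun kw => PySem.Str.isIn kw company_lower) then
        (cats.modify "Asian" [] (fun l => l ++ [company]), true)
      else (cats, false)
    if st.2 = false then st.1.modify "Other" [] (fun l => l ++ [company]) else st.1)
    initCategories).items

-- ===== PORT B =====
def pvTable : List (String × List String) :=
  [("AI_ML", aiKeywords), ("Fintech", fintechKeywords), ("European", europeanKeywords), ("Asian", asianKeywords)]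

-- the inner loop of Source B: split `remaining` into (hits, misses) by appending
def splitStage (keywords : List String) (remaining : List String) : List String × List String :=
  remaining.foldl (fun hm company =>
    let company_lower := PySem.Str.lower company
    if keywords.any (fun k => PySem.Str.isIn k company_lower) then (hm.1 ++ [company], hm.2)
    else (hm.1, hm.2 ++ [company])) ([], [])

def categorize_companies_alt (companies : List String) : List (String × List String) :=
  let st := pvTable.foldl (fun (st : PySem.Dict String (List String) × List String) nk =>
    let hm := splitStage nk.2 st.2
    (st.1.insert nk.1 hm.1, hm.2)) (initCategories, companies)
  (st.1.insert "Other" st.2).items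

-- ===== PRECONDITION & SPEC =====
def Spec_categorize_companies (companies : List String) (out : List (String × List String)) : Prop := out = categorize_companies_alt companies
instance (companies : List String) (out : List (String × List String)) : Decidable (Spec_categorize_companies companies out) := by unfold Spec_categorize_companies; infer_instance

-- ===== CLAIM (what is proved, stated in full; the proofs are below) =====
def Claim_equal_categorize_companies : Prop := ∀ (companies : List String), Dom_categorize_companies companies → Spec_categorize_companies companies (categorize_companies companies)

-- ===== LEMMAS AND PROOFS =====

-- match predicates
def mAI (c : String) : Bool := aiKeywords.any (fun kw => PySem.Str.isIn kw (PySem.Str.lower c))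
def mFin (c : String) : Bool := fintechKeywords.any (fun kw => PySem.Str.isIn kw (PySem.Str.lower c))
def mEu (c : String) : Bool := europeanKeywords.any (fun kw => PySem.Str.isIn kw (PySem.Str.lower c))
def mAs (c : String) : Bool := asianKeywords.any (fun kw => PySem.Str.isIn kw (PySem.Str.lower c))

-- the category A's chain assigns to a company
def catOf (c : String) : String :=
  if mAI c then "AI_ML" else if mFin c then "Fintech" else if mEu c then "European"
  else if mAs c then "Asian" else "Other"

lemma stepA_eq (cats : PySem.Dict String (List String)) (company : String) :
    (let company_lower := PySem.Str.lower company
     let st :=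
       if aiKeywords.any (fun kw => PySem.Str.isIn kw company_lower) then
         (cats.modify "AI_ML" [] (fun l => l ++ [company]), true)
       else if fintechKeywords.any (fun kw => PySem.Str.isIn kw company_lower) then
         (cats.modify "Fintech" [] (fun l => l ++ [company]), true)
       else if europeanKeywords.any (fun kw => PySem.Str.isIn kw company_lower) then
         (cats.modify "European" [] (fun l => l ++ [company]), true)
       else if asianKeywords.any (fun kw => PySem.Str.isIn kw company_lower) then
         (cats.modify "Asian" [] (fun l => l ++ [company]), true)
       else (cats, false)
     if st.2 = false then st.1.modify "Other" [] (fun l => l ++ [company]) else st.1) =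
    cats.modify (catOf company) [] (fun l => l ++ [company]) := by
  simp only [catOf, mAI, mFin, mEu, mAs]
  split_ifs <;> simp_all

-- splitStage computes the two filters
lemma splitStage_eq (kws : List String) (l : List String) :
    splitStage kws l =
      (l.filter (fun c => kws.any (fun k => PySem.Str.isIn k (PySem.Str.lower c))),
       l.filter (fun c => !(kws.any (fun k => PySem.Str.isIn k (PySem.Str.lower c))))) := by
  have h : ∀ (l : List String) (a b : List String),
      l.foldl (fun hm company =>
        let company_lower := PySem.Str.lower company
        if kws.any (fun k => PySem.Str.isIn k company_lower) then (hm.1 ++ [company], hm.2)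
        else (hm.1, hm.2 ++ [company])) (a, b) =
      (a ++ l.filter (fun c => kws.any (fun k => PySem.Str.isIn k (PySem.Str.lower c))),
       b ++ l.filter (fun c => !(kws.any (fun k => PySem.Str.isIn k (PySem.Str.lower c))))) := by
    intro l
    induction l with
    | nil => simp
    | cons x xs ih =>
      intro a b
      by_cases hx : kws.any (fun k => PySem.Str.isIn k (PySem.Str.lower x)) = true
      · simp only [List.foldl_cons, List.filter_cons, hx, if_pos, Bool.not_true]
        rw [ih]
        simp
      · simp only [List.foldl_cons, List.filter_cons, Bool.not_eq_true] at *
        simp only [hx, Bool.false_eq_true, if_false]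
        rw [ih]
        simp
  have := h l [] []
  simpa [splitStage] using this
  
-- A's dict as a fold over a single modify step
def stepA (d : PySem.Dict String (List String)) (c : String) : PySem.Dict String (List String) :=
  d.modify (catOf c) [] (fun l => l ++ [c])

def dictA (companies : List String) : PySem.Dict String (List String) :=
  companies.foldl stepA initCategories

-- B's final dict, written out
def dictB (companies : List String) : PySem.Dict String (List String) :=
  (((((initCategories.insert "AI_ML" (companies.filter mAI)).insert "Fintech"
      ((companies.filter (fun c => !mAI c)).filter mFin)).insert "European"
      (((companies.filter (fun c => !mAI c)).filter (fun c => !mFin c)).filter mEu)).insert "Asian"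
      ((((companies.filter (fun c => !mAI c)).filter (fun c => !mFin c)).filter (fun c => !mEu c)).filter mAs)).insert "Other"
      ((((companies.filter (fun c => !mAI c)).filter (fun c => !mFin c)).filter (fun c => !mEu c)).filter (fun c => !mAs c)))

lemma a_eq_dictA (companies : List String) : categorize_companies companies = (dictA companies).items := by
  unfold categorize_companies dictA
  congr 1
  apply List.foldl_ext
  intro cats company _
  exact stepA_eq cats company

lemma b_eq_dictB (companies : List String) : categorize_companies_alt companies = (dictB companies).items := by
  unfold categorize_companies_alt pvTable dictB
  simp only [List.foldl_cons, List.foldl_nil, splitStage_eq]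
  rfl

lemma keys_init : initCategories.keys =
    ["AI_ML", "Fintech", "European", "Asian", "African", "Latin_American", "Climate_Tech",
     "Biotech", "Space_Tech", "B2B_SaaS", "E_commerce", "Gaming", "Other"] := rfl

lemma keys_dictA (companies : List String) : (dictA companies).keys = initCategories.keys := by
  unfold dictA stepA
  rw [PySem.Dict.keys_foldl_modify_key companies catOf [] (fun _ c l => l ++ [c]) initCategories]
  rw [PySem.Set.update_eq_append_filter]
  have h : ((PySem.Set.ofList (companies.map catOf)).filter
      (fun y => !(PySem.Set.contains initCategories.keys y))) = [] := by
    rw [List.filter_eq_nil_iff]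
    intro y hy
    have : y ∈ companies.map catOf := (PySem.Set.mem_ofList _ _).mp hy
    obtain ⟨c, _, rfl⟩ := List.mem_map.mp this
    unfold catOf
    split_ifs <;> decide
  rw [h, List.append_nil]

lemma getD_dictA (companies : List String) (k : String) :
    (dictA companies).getD k [] =
      initCategories.getD k [] ++ companies.filter (fun c => catOf c == k) := by
  unfold dictA stepA
  have hmap : companies.foldl (fun d c => d.modify (catOf c) [] (fun l => l ++ [c])) initCategories
      = (companies.map (fun c => (catOf c, c))).foldl
          (fun d p => d.modify p.1 [] (fun l => l ++ [p.2])) initCategories := by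
    rw [List.foldl_map]
  rw [hmap, PySem.Dict.getD_foldl_modify_append]
  congr 1
  rw [List.filter_map]
  rw [List.map_map]
  simp [Function.comp_def]

lemma keys_dictB (companies : List String) : (dictB companies).keys = initCategories.keys := by
  unfold dictB
  rw [PySem.Dict.keys_insert_of_contains, PySem.Dict.keys_insert_of_contains,
      PySem.Dict.keys_insert_of_contains, PySem.Dict.keys_insert_of_contains,
      PySem.Dict.keys_insert_of_contains]
  · decide
  all_goals (try simp [PySem.Dict.contains_insert])
  all_goals decide

-- per-key characterisations of A's filter
lemma filt_ai (l : List String) : l.filter (fun c => catOf c == "AI_ML") = l.filter mAI := by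
  apply List.filter_congr
  intro c _
  unfold catOf
  split_ifs <;> simp_all

lemma filt_fin (l : List String) :
    l.filter (fun c => catOf c == "Fintech") = (l.filter (fun c => !mAI c)).filter mFin := by
  rw [List.filter_filter]
  apply List.filter_congr
  intro c _
  unfold catOf
  split_ifs <;> simp_all

lemma filt_eu (l : List String) :
    l.filter (fun c => catOf c == "European") =
      ((l.filter (fun c => !mAI c)).filter (fun c => !mFin c)).filter mEu := by
  rw [List.filter_filter, List.filter_filter]
  apply List.filter_congr
  intro c _
  unfold catOf
  split_ifs <;> simp_all

lemma filt_as (l : List String) :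
    l.filter (fun c => catOf c == "Asian") =
      (((l.filter (fun c => !mAI c)).filter (fun c => !mFin c)).filter (fun c => !mEu c)).filter mAs := by
  rw [List.filter_filter, List.filter_filter, List.filter_filter]
  apply List.filter_congr
  intro c _
  unfold catOf
  split_ifs <;> simp_all

lemma filt_other (l : List String) :
    l.filter (fun c => catOf c == "Other") =
      (((l.filter (fun c => !mAI c)).filter (fun c => !mFin c)).filter (fun c => !mEu c)).filter (fun c => !mAs c) := by
  rw [List.filter_filter, List.filter_filter, List.filter_filter]
  apply List.filter_congr
  intro c _
  unfold catOf
  split_ifs <;> simp_all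

lemma filt_none (l : List String) (k : String)
    (h1 : k ≠ "AI_ML") (h2 : k ≠ "Fintech") (h3 : k ≠ "European") (h4 : k ≠ "Asian")
    (h5 : k ≠ "Other") : l.filter (fun c => catOf c == k) = [] := by
  rw [List.filter_eq_nil_iff]
  intro c _
  unfold catOf
  split_ifs <;> simp_all [Ne.symm]

theorem categorize_companies_spec : Claim_equal_categorize_companies := by
  intro companies _
  unfold Spec_categorize_companies
  rw [a_eq_dictA, b_eq_dictB]
  rw [PySem.Dict.items_eq_map_keys (dictA companies) (by rw [keys_dictA]; decide) [],
      PySem.Dict.items_eq_map_keys (dictB companies) (by rw [keys_dictB]; decide) []]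
  rw [keys_dictA, keys_dictB, keys_init]
  apply List.map_congr_left
  intro k hk
  have hB : ∀ k, (dictB companies).getD k [] =
      (if k = "Other" then (((companies.filter (fun c => !mAI c)).filter (fun c => !mFin c)).filter (fun c => !mEu c)).filter (fun c => !mAs c)
       else if k = "Asian" then (((companies.filter (fun c => !mAI c)).filter (fun c => !mFin c)).filter (fun c => !mEu c)).filter mAs
       else if k = "European" then ((companies.filter (fun c => !mAI c)).filter (fun c => !mFin c)).filter mEu
       else if k = "Fintech" then (companies.filter (fun c => !mAI c)).filter mFin
       else if k = "AI_ML" then companies.filter mAI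
       else initCategories.getD k []) := by
    intro k
    unfold dictB
    simp [PySem.Dict.getD_insert]
  fin_cases hk <;>
    simp only [getD_dictA, hB, Prod.mk.injEq, true_and] <;>
    first
    | (rw [filt_ai]; rfl)
    | (rw [filt_fin]; rfl)
    | (rw [filt_eu]; rfl)
    | (rw [filt_as]; rfl)
    | (rw [filt_other]; rfl)
    | (rw [filt_none _ _ (by decide) (by decide) (by decide) (by decide) (by decide)]; rfl)
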